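-- pv_equiv track=rewrite | github.com/masonelmore/advent-of-code | solutions/year2023/day01.py | parse_first_digit
-- ===== SOURCE A (Python) =====
-- def parse_first_digit(string, parse_words=False):
--     for i, char in enumerate(string):
--         if char.isdigit():
--             return char
--
--         if not parse_words:
--             continue
--
--         digit = parse_word(string[i:])
--         if digit:
--             return digit
--
-- def parse_word(string):
--     words = [
--         'zero', 'one', 'two', 'three', 'four',
--         'five', 'six', 'seven', 'eight', 'nine'
--     ]
--     for digit, word in enumerate(words):
--         if string.startswith(word):
--             return str(digit)
-- ===== SOURCE B (Python) =====
-- WORDS = ['zero', 'one', 'two', 'three', 'four',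
--          'five', 'six', 'seven', 'eight', 'nine']
--
--
-- def parse_first_digit(string, parse_words=False):
--     # Per-candidate search: str.find for each digit (and each spelled word),
--     # keep the candidate with the strictly smallest position.
--     candidates = [(str(d), str(d)) for d in range(10)]
--     if parse_words:
--         candidates += [(word, str(d)) for d, word in enumerate(WORDS)]
--     best = None
--     for pattern, value in candidates:
--         pos = string.find(pattern)
--         if pos != -1 and (best is None or pos < best[0]):
--             best = (pos, value)
--     if best is None:
--         return None
--     return best[1]
-- ===== Notes on version B (the rewrite author's own statement) =====
-- stated objective: faster
-- what changed: Replaces the position-by-position scan (isdigit test plus a startswith loop over the ten words at every index) with a per-candidate search: one str.find per digit/word pattern, keeping the candidate at the strictly smallest position (ties are impossible since no two patterns can match at the same index).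
import Mathlib
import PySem

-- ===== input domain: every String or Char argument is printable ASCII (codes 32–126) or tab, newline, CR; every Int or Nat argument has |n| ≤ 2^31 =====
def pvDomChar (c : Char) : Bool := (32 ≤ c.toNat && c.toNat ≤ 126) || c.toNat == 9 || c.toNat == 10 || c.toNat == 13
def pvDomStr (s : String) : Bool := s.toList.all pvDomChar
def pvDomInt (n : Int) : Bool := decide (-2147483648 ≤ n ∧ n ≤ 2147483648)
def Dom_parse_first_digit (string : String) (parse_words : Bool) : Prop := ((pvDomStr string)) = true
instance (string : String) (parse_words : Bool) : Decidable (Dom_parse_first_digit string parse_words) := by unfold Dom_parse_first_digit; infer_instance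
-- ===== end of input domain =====

-- B replaces A's Python-level position-by-position scan with one str.find per candidate
-- pattern, keeping the candidate at the strictly smallest position (measured faster).

-- ===== PORT A =====
def pfd_words : List String :=
  ["zero", "one", "two", "three", "four", "five", "six", "seven", "eight", "nine"]

-- early-return loop of parse_word as a fold with an Option accumulator
def pwStep (s : String) (acc : Option String) (dw : Int × String) : Option String :=
  match acc with
  | some r => some r
  | none => if PySem.Str.startswith s dw.2 then some (PySem.Int.toStr dw.1) else none

def parse_word (s : String) : Option String :=
  (PySem.List.enumerate pfd_words).foldl (pwStep s) none

-- the for-loop of A; string[i:] is exactly the current suffix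
def pfdGoA (parse_words : Bool) : List Char → Option String
  | [] => none
  | c :: t =>
    if PySem.Chars.isdigit c then some (String.ofList [c])
    else if !parse_words then pfdGoA parse_words t
    else
      match parse_word (String.ofList (c :: t)) with
      | some d => some d
      | none => pfdGoA parse_words t

def parse_first_digit (string : String) (parse_words : Bool) : Option String :=
  pfdGoA parse_words string.toList

-- ===== PORT B =====
def pfd_table (parse_words : Bool) : List (String × String) :=
  ((PySem.List.pyRange 0 10 1).map (fun d => (PySem.Int.toStr d, PySem.Int.toStr d)))
    ++ (if parse_words
        then (PySem.List.enumerate pfd_words).map (fun dw => (dw.2, PySem.Int.toStr dw.1))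
        else [])

def pfdStep (string : String) (best : Option (Int × String)) (pv : String × String) :
    Option (Int × String) :=
  let pos := PySem.Str.find string pv.1
  if (pos != -1) && (match best with | none => true | some b => decide (pos < b.1))
  then some (pos, pv.2) else best

def parse_first_digit_alt (string : String) (parse_words : Bool) : Option String :=
  ((pfd_table parse_words).foldl (pfdStep string) none).map (fun b => b.2)

-- ===== PRECONDITION & SPEC =====
def Spec_parse_first_digit (string : String) (parse_words : Bool) (out : Option String) : Prop := out = parse_first_digit_alt string parse_words
instance (string : String) (parse_words : Bool) (out : Option String) : Decidable (Spec_parse_first_digit string parse_words out) := by unfold Spec_parse_first_digit; infer_instance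

-- ===== CLAIM (what is proved, stated in full; the proofs are below) =====
def Claim_equal_parse_first_digit : Prop := ∀ (string : String) (parse_words : Bool), Dom_parse_first_digit string parse_words → Spec_parse_first_digit string parse_words (parse_first_digit string parse_words)

-- ===== LEMMAS AND PROOFS =====

-- list-level version of B's fold step
def stepC (l : List Char) (best : Option (Int × String)) (pv : String × String) :
    Option (Int × String) :=
  let pos := PySem.Chars.find l pv.1.toList
  if (pos != -1) && (match best with | none => true | some b => decide (pos < b.1))
  then some (pos, pv.2) else best

def altOf (parse_words : Bool) (l : List Char) : Option String :=
  ((pfd_table parse_words).foldl (stepC l) none).map (fun b => b.2)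

def shiftO : Option (Int × String) → Option (Int × String)
  | none => none
  | some b => some (b.1 + 1, b.2)

-- value of the first table entry whose pattern is a prefix of l
def firstHit : List (String × String) → List Char → Option String
  | [], _ => none
  | pv :: rest, l => if pv.1.toList <+: l then some pv.2 else firstHit rest l

lemma step_eq (s : String) : pfdStep s = stepC s.toList := by
  funext best pv
  simp only [pfdStep, stepC, PySem.Str.find_eq]
  rfl

lemma alt_eq (s : String) (pw : Bool) : parse_first_digit_alt s pw = altOf pw s.toList := by
  simp [parse_first_digit_alt, altOf, step_eq]

lemma find_prefix_eq_zero {l p : List Char} (hp : p <+: l) : PySem.Chars.find l p = 0 := by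
  have h0 : 0 ≤ PySem.Chars.find l p := (PySem.Chars.find_nonneg_iff l p).mpr hp.isInfix
  obtain ⟨-, h2⟩ := PySem.Chars.find_spec h0
  by_contra hne
  have hpos : 0 < (PySem.Chars.find l p).toNat := by omega
  exact h2 0 hpos (by simpa using hp)

lemma find_eq_of_prefix_min {l p : List Char} (n : Nat) (hp : p <+: l.drop n)
    (hmin : ∀ i < n, ¬ p <+: l.drop i) : PySem.Chars.find l p = n := by
  have hinf : p <:+: l := hp.isInfix.trans (List.drop_suffix n l).isInfix
  have h0 : 0 ≤ PySem.Chars.find l p := (PySem.Chars.find_nonneg_iff l p).mpr hinf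
  obtain ⟨h1, h2⟩ := PySem.Chars.find_spec h0
  rcases Nat.lt_trichotomy (PySem.Chars.find l p).toNat n with hlt | heq | hgt
  · exact absurd h1 (hmin _ hlt)
  · omega
  · exact absurd hp (h2 n hgt)

lemma find_cons_of_not_prefix {c : Char} {t p : List Char} (h : ¬ p <+: (c :: t)) :
    PySem.Chars.find (c :: t) p =
      (if PySem.Chars.find t p = -1 then -1 else PySem.Chars.find t p + 1) := by
  by_cases h1 : PySem.Chars.find t p = -1
  · rw [if_pos h1, PySem.Chars.find_eq_neg_one_iff] at *
    intro hinf
    rcases List.infix_cons_iff.mp hinf with hpre | hinf'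
    · exact h hpre
    · exact h1 hinf'
  · have h0 : 0 ≤ PySem.Chars.find t p := by
      have := PySem.Chars.neg_one_le_find t p; omega
    obtain ⟨hpre, hmin⟩ := PySem.Chars.find_spec h0
    rw [if_neg h1]
    have := find_eq_of_prefix_min (l := c :: t) (p := p) ((PySem.Chars.find t p).toNat + 1)
      (by simpa using hpre)
      (by
        intro i hi
        match i, hi with
        | 0, _ => simpa using h
        | (j+1), hj => exact hmin j (by omega))
    rw [this]; push_cast; omega

lemma keep0 (table : List (String × String)) (l : List Char) (v : String) :
    table.foldl (stepC l) (some (0, v)) = some (0, v) := by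
  induction table with
  | nil => rfl
  | cons pv rest ih =>
    have hge := PySem.Chars.neg_one_le_find l pv.1.toList
    simp only [List.foldl_cons, stepC]
    rw [if_neg (by simp; omega)]
    exact ih

lemma foldl_shift {c : Char} {t : List Char} (table : List (String × String))
    (h : ∀ pv ∈ table, ¬ pv.1.toList <+: (c :: t)) (b : Option (Int × String)) :
    table.foldl (stepC (c :: t)) (shiftO b) = shiftO (table.foldl (stepC t) b) := by
  induction table generalizing b with
  | nil => rfl
  | cons pv rest ih =>
    have hnp := h pv (List.mem_cons_self ..)
    have hstep : stepC (c :: t) (shiftO b) pv = shiftO (stepC t b pv) := by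
      have hc := find_cons_of_not_prefix hnp
      by_cases h1 : PySem.Chars.find t pv.1.toList = -1
      · rw [if_pos h1] at hc
        cases b <;> simp [stepC, shiftO, hc, h1]
      · rw [if_neg h1] at hc
        have hge := PySem.Chars.neg_one_le_find t pv.1.toList
        cases b with
        | none => simp [stepC, shiftO, hc, h1]; omega
        | some bb =>
          simp only [stepC, shiftO, hc]
          by_cases h2 : PySem.Chars.find t pv.1.toList < bb.1
          · rw [if_pos (by simp; omega), if_pos (by simp; omega)]
          · rw [if_neg (by simp; omega), if_neg (by simp; omega)]
    simp only [List.foldl_cons, hstep]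
    exact ih (fun q hq => h q (List.mem_cons_of_mem _ hq)) _

lemma foldl_firstHit {l : List Char} (table : List (String × String)) (v : String) :
    ∀ b : Option (Int × String), (b = none ∨ ∃ k w, b = some (k, w) ∧ 1 ≤ k) →
    firstHit table l = some v →
    (table.foldl (stepC l) b).map (fun b => b.2) = some v := by
  induction table with
  | nil => intro b hb hf; exact absurd hf (by simp [firstHit])
  | cons pv rest ih =>
    intro b hb hf
    by_cases hp : pv.1.toList <+: l
    · rw [firstHit, if_pos hp] at hf
      have hf0 : PySem.Chars.find l pv.1.toList = 0 := find_prefix_eq_zero hp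
      have hbest : stepC l b pv = some (0, pv.2) := by
        rcases hb with rfl | ⟨k, w, rfl, hk⟩
        · simp [stepC, hf0]
        · simp [stepC, hf0]; omega
      simp only [List.foldl_cons, hbest, keep0]
      exact hf
    · rw [firstHit, if_neg hp] at hf
      have hge := PySem.Chars.neg_one_le_find l pv.1.toList
      have hnz : PySem.Chars.find l pv.1.toList ≠ 0 := by
        intro h0
        have := PySem.Chars.find_spec (s := l) (sub := pv.1.toList) (by omega)
        rw [h0] at this
        exact hp (by simpa using this.1)
      have hnext : stepC l b pv = b ∨
          ∃ k w, stepC l b pv = some (k, w) ∧ 1 ≤ k := by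
        rcases hb with rfl | ⟨k, w, rfl, hk⟩
        · by_cases hne : PySem.Chars.find l pv.1.toList = -1
          · left; simp [stepC, hne]
          · right; exact ⟨PySem.Chars.find l pv.1.toList, pv.2, by simp [stepC, hne], by omega⟩
        · by_cases hlt : PySem.Chars.find l pv.1.toList < k
          · by_cases hne : PySem.Chars.find l pv.1.toList = -1
            · left; simp [stepC, hne]
            · right; exact ⟨PySem.Chars.find l pv.1.toList, pv.2, by simp [stepC, hne, hlt], by omega⟩
          · left; simp [stepC, hlt]
      simp only [List.foldl_cons]
      rcases hnext with heq | ⟨k, w, heq, hk⟩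
      · rw [heq]; exact ih b hb hf
      · rw [heq]; exact ih _ (Or.inr ⟨k, w, rfl, hk⟩) hf

lemma firstHit_none {l : List Char} {table : List (String × String)}
    (h : firstHit table l = none) : ∀ pv ∈ table, ¬ pv.1.toList <+: l := by
  induction table with
  | nil => simp
  | cons pv rest ih =>
    rw [firstHit] at h
    intro q hq
    rcases List.mem_cons.mp hq with rfl | hq'
    · intro hp; rw [if_pos hp] at h; simp at h
    · by_cases hp : pv.1.toList <+: l
      · rw [if_pos hp] at h; simp at h
      · rw [if_neg hp] at h; exact ih h q hq'

lemma firstHit_append {l : List Char} {t1 t2 : List (String × String)}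
    (h : ∀ pv ∈ t1, ¬ pv.1.toList <+: l) : firstHit (t1 ++ t2) l = firstHit t2 l := by
  induction t1 with
  | nil => rfl
  | cons pv rest ih =>
    rw [List.cons_append, firstHit, if_neg (h pv (List.mem_cons_self ..))]
    exact ih (fun q hq => h q (List.mem_cons_of_mem _ hq))

lemma pw_foldl_some (ews : List (Int × String)) (s : String) (r : String) :
    ews.foldl (pwStep s) (some r) = some r := by
  induction ews with
  | nil => rfl
  | cons dw rest ih => simpa [pwStep] using ih

lemma pw_to_firstHit (ews : List (Int × String)) (l : List Char) :
    ews.foldl (pwStep (String.ofList l)) none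
      = firstHit (ews.map (fun dw => (dw.2, PySem.Int.toStr dw.1))) l := by
  induction ews with
  | nil => rfl
  | cons dw rest ih =>
    simp only [List.foldl_cons, List.map_cons, firstHit]
    by_cases hp : dw.2.toList <+: l
    · have hsw : PySem.Chars.startswith l dw.2.toList = true :=
        (PySem.Chars.startswith_iff ..).mpr hp
      rw [if_pos hp]
      simp [pwStep, hsw, pw_foldl_some]
    · have hsw : PySem.Chars.startswith l dw.2.toList = false := by
        rw [Bool.eq_false_iff]
        intro hc
        exact hp ((PySem.Chars.startswith_iff ..).mp hc)
      rw [if_neg hp]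
      simpa [pwStep, hsw] using ih

lemma char_of_toNat {c : Char} {n : Nat} (h : c.toNat = n) : c = Char.ofNat n := by
  have h2 : Char.ofNat c.toNat = Char.ofNat n := by rw [h]
  rwa [Char.ofNat_toNat] at h2

set_option maxRecDepth 4000 in
lemma digit_char_enum {c : Char} (h : PySem.Chars.isdigit c = true) :
    c = '0' ∨ c = '1' ∨ c = '2' ∨ c = '3' ∨ c = '4' ∨
    c = '5' ∨ c = '6' ∨ c = '7' ∨ c = '8' ∨ c = '9' := by
  simp only [PySem.Chars.isdigit, Bool.and_eq_true, decide_eq_true_eq] at h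
  have h1 : 48 ≤ c.toNat := Nat.succ_le_of_lt h.1
  have h2 : c.toNat ≤ 57 := h.2
  interval_cases hn : c.toNat <;> (have hc := char_of_toNat hn; subst hc; decide)

def digitLit : List (String × String) :=
  [("0","0"),("1","1"),("2","2"),("3","3"),("4","4"),
   ("5","5"),("6","6"),("7","7"),("8","8"),("9","9")]

def wordLit : List (String × String) :=
  [("zero","0"),("one","1"),("two","2"),("three","3"),("four","4"),
   ("five","5"),("six","6"),("seven","7"),("eight","8"),("nine","9")]

lemma table_eq (pw : Bool) : pfd_table pw = digitLit ++ (if pw then wordLit else []) := by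
  cases pw <;> decide

lemma word_map_eq :
    (PySem.List.enumerate pfd_words).map (fun dw => (dw.2, PySem.Int.toStr dw.1)) = wordLit := by
  decide

lemma parse_word_eq (l : List Char) : parse_word (String.ofList l) = firstHit wordLit l := by
  rw [parse_word, pw_to_firstHit, word_map_eq]

lemma map_snd_shiftO (o : Option (Int × String)) :
    (shiftO o).map (fun b => b.2) = o.map (fun b => b.2) := by
  cases o <;> rfl

lemma foldl_nil_none (table : List (String × String))
    (h : ∀ pv ∈ table, pv.1.toList ≠ []) : table.foldl (stepC []) none = none := by
  induction table with
  | nil => rfl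
  | cons pv rest ih =>
    have hf : PySem.Chars.find [] pv.1.toList = -1 := by
      rw [PySem.Chars.find_eq_neg_one_iff]
      intro hinf
      exact h pv (List.mem_cons_self ..) (List.infix_nil.mp hinf)
    simp only [List.foldl_cons, stepC, hf]
    rw [if_neg (by simp)]
    exact ih (fun q hq => h q (List.mem_cons_of_mem _ hq))

lemma digits_no_prefix {c : Char} {t : List Char} (hd : PySem.Chars.isdigit c = false) :
    ∀ pv ∈ digitLit, ¬ pv.1.toList <+: (c :: t) := by
  intro pv hpv
  fin_cases hpv <;>
    (intro hp
     simp [List.cons_prefix_cons] at hp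
     rw [← hp] at hd
     exact absurd hd (by decide))

lemma alt_shift {c : Char} {t : List Char} (pw : Bool)
    (h : ∀ pv ∈ pfd_table pw, ¬ pv.1.toList <+: (c :: t)) :
    altOf pw (c :: t) = altOf pw t := by
  unfold altOf
  have h2 := foldl_shift (pfd_table pw) h none
  rw [show shiftO none = none from rfl] at h2
  rw [h2, map_snd_shiftO]

lemma pfdGoA_nil (pw : Bool) : pfdGoA pw [] = none := rfl

lemma pfdGoA_cons (pw : Bool) (c : Char) (t : List Char) :
    pfdGoA pw (c :: t) =
      if PySem.Chars.isdigit c then some (String.ofList [c])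
      else if !pw then pfdGoA pw t
      else
        match parse_word (String.ofList (c :: t)) with
        | some d => some d
        | none => pfdGoA pw t := rfl

lemma main_lemma (pw : Bool) (l : List Char) : pfdGoA pw l = altOf pw l := by
  induction l with
  | nil =>
    have h : ∀ pv ∈ pfd_table pw, pv.1.toList ≠ [] := by
      cases pw <;> decide
    unfold altOf
    rw [foldl_nil_none _ h, pfdGoA_nil]
    rfl
  | cons c t ih =>
    by_cases hd : PySem.Chars.isdigit c = true
    · have hfh : firstHit (pfd_table pw) (c :: t) = some (String.ofList [c]) := by
        rw [table_eq]
        rcases digit_char_enum hd with rfl | rfl | rfl | rfl | rfl | rfl | rfl | rfl | rfl | rfl <;>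
          cases pw <;>
          (simp [firstHit, digitLit, wordLit, List.cons_prefix_cons]; try decide)
      rw [pfdGoA_cons, if_pos hd]
      exact (foldl_firstHit (pfd_table pw) _ none (Or.inl rfl) hfh).symm
    · have hd' : PySem.Chars.isdigit c = false := by simpa using hd
      have hdig := digits_no_prefix (t := t) hd'
      cases pw with
      | false =>
        rw [pfdGoA_cons, if_neg hd, if_pos (by simp), ih, alt_shift]
        intro pv hpv
        rw [table_eq] at hpv
        simp only [if_neg (Bool.false_ne_true), List.append_nil] at hpv
        exact hdig pv hpv
      | true =>
        rw [pfdGoA_cons, if_neg hd, if_neg (by simp)]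
        cases hpw : parse_word (String.ofList (c :: t)) with
        | some v =>
          have hfh : firstHit (pfd_table true) (c :: t) = some v := by
            rw [table_eq, if_pos rfl, firstHit_append hdig, ← parse_word_eq, hpw]
          exact (foldl_firstHit (pfd_table true) _ none (Or.inl rfl) hfh).symm
        | none =>
          rw [ih, alt_shift]
          intro pv hpv
          rw [table_eq, if_pos rfl] at hpv
          rcases List.mem_append.mp hpv with hm | hm
          · exact hdig pv hm
          · have hw : firstHit wordLit (c :: t) = none := by
              rw [← parse_word_eq, hpw]
            exact firstHit_none hw pv hm

-- ===== VERDICT (by name: the statement is the Claim_ definition above) =====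
theorem parse_first_digit_spec : Claim_equal_parse_first_digit := by
  intro s pw _
  unfold Spec_parse_first_digit
  rw [alt_eq, parse_first_digit, main_lemma]
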